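-- pv_equiv track=rewrite | github.com/esedkowski/advent-of-code-2025 | day4/day4.py | count_horizontal_neighbours
-- ===== SOURCE A (Python) =====
-- def count_horizontal_neighbours(row, is_previous_roll=0):
--     for position in row:
--         if position == "@":
--             is_roll = 1
--         else:
--             is_roll = 0
--         if len(row) > 1:
--             new_row = count_horizontal_neighbours(row[1:], is_roll)
--             is_next_roll = new_row[0][0]
--         else:
--             is_next_roll, new_row = 0, []
--
--         horizontal_neighbours = is_previous_roll + is_next_roll
--         new_row.insert(0, [is_roll, horizontal_neighbours])
--
--         return new_row
-- ===== SOURCE B (Python) =====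
-- def count_horizontal_neighbours(row, is_previous_roll=0):
--     flags = [1 if c == "@" else 0 for c in row]
--     prevs = [is_previous_roll] + flags[:-1]
--     nexts = flags[1:] + [0]
--     return [[f, p + q] for f, p, q in zip(flags, prevs, nexts)]
-- ===== Notes on version B (the rewrite author's own statement) =====
-- stated objective: faster
-- what changed: Replaces the O(n^2) recursion (each level slices the string and inserts at the front of a list) by one linear pass that builds the flag list once and zips it with its two shifted copies.
-- outside the precondition, e.g. on count_horizontal_neighbours('', 0): A returns None, B returns []
import Mathlib
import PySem

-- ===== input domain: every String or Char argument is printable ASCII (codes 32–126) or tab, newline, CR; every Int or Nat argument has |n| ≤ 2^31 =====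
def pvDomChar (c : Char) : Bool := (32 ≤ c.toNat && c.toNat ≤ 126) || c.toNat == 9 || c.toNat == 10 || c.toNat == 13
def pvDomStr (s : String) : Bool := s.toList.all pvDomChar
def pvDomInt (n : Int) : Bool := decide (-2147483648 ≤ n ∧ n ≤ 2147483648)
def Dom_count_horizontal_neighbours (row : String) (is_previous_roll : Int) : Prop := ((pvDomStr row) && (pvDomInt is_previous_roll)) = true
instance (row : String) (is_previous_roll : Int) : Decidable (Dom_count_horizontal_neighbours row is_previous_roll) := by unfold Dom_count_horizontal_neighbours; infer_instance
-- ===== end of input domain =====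

-- B replaces A's quadratic slice-and-recurse by one linear pass zipping the flag
-- list with its two shifted copies (objective: faster, asymptotic).
-- Pre_ excludes the empty row, on which A's for-loop never runs and A returns None
-- instead of a list; B returns [] there.


-- ===== PORT A =====
-- Recursion on the character list; `new_row[0][0]` is read with headD (exact here:
-- the recursive call on a nonempty list always returns a nonempty list of nonempty
-- lists). The empty row (Python returns None, no list) is outside Pre_ and yields [].
def chnGoA : List Char → Int → List (List Int)
  | [], _ => []
  | c :: rest, is_previous_roll =>
    let is_roll : Int := if c = '@' then 1 else 0
    let (is_next_roll, new_row) :=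
      if rest ≠ [] then
        let new_row := chnGoA rest is_roll
        (((new_row.headD []).headD 0), new_row)
      else
        (0, [])
    let horizontal_neighbours := is_previous_roll + is_next_roll
    [is_roll, horizontal_neighbours] :: new_row

def count_horizontal_neighbours (row : String) (is_previous_roll : Int) : List (List Int) :=
  chnGoA row.toList is_previous_roll

-- ===== PORT B =====
-- flags[:-1] = dropLast, flags[1:] = drop 1 (exact on lists); zip of three lists
-- ported as zip of flags with the zipped shifted pair.
def count_horizontal_neighbours_alt (row : String) (is_previous_roll : Int) : List (List Int) :=
  let flags := row.toList.map (fun c => if c = '@' then (1 : Int) else 0)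
  let prevs := is_previous_roll :: flags.dropLast
  let nexts := flags.drop 1 ++ [0]
  List.zipWith (fun f pq => [f, pq.1 + pq.2]) flags (prevs.zip nexts)

-- ===== PRECONDITION & SPEC =====
-- Pre_ excludes the empty row, on which A's for-loop body never runs and A returns None (not a list).
def Pre_count_horizontal_neighbours (row : String) (is_previous_roll : Int) : Prop := row ≠ ""
instance (row : String) (is_previous_roll : Int) : Decidable (Pre_count_horizontal_neighbours row is_previous_roll) := by unfold Pre_count_horizontal_neighbours; infer_instance
def pvWitness_count_horizontal_neighbours : String × Int := ("@.@", 1)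

def Spec_count_horizontal_neighbours (row : String) (is_previous_roll : Int) (out : List (List Int)) : Prop := out = count_horizontal_neighbours_alt row is_previous_roll
instance (row : String) (is_previous_roll : Int) (out : List (List Int)) : Decidable (Spec_count_horizontal_neighbours row is_previous_roll out) := by unfold Spec_count_horizontal_neighbours; infer_instance

-- ===== CLAIM (what is proved, stated in full; the proofs are below) =====
def Claim_equal_count_horizontal_neighbours : Prop := ∀ (row : String) (is_previous_roll : Int), Dom_count_horizontal_neighbours row is_previous_roll → Pre_count_horizontal_neighbours row is_previous_roll → Spec_count_horizontal_neighbours row is_previous_roll (count_horizontal_neighbours row is_previous_roll)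

-- ===== LEMMAS AND PROOFS =====
theorem chnGoA_eq (l : List Char) (p : Int) (h : l ≠ []) :
    chnGoA l p =
      List.zipWith (fun f pq => [f, pq.1 + pq.2])
        (l.map (fun c => if c = '@' then (1 : Int) else 0))
        ((p :: (l.map (fun c => if c = '@' then (1 : Int) else 0)).dropLast).zip
          ((l.map (fun c => if c = '@' then (1 : Int) else 0)).drop 1 ++ [0])) := by
  induction l generalizing p with
  | nil => exact absurd rfl h
  | cons c rest ih =>
    cases rest with
    | nil => simp [chnGoA]
    | cons d rest' =>
      rw [chnGoA, ih _ (by simp)]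
      cases rest' <;> simp [List.zip]

theorem count_horizontal_neighbours_spec : Claim_equal_count_horizontal_neighbours := by
  intro row p _ hpre
  have hl : row.toList ≠ [] := by
    simpa [String.toList_eq_nil_iff] using hpre
  unfold Spec_count_horizontal_neighbours count_horizontal_neighbours count_horizontal_neighbours_alt
  exact chnGoA_eq row.toList p hl
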